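-- pv_equiv track=rewrite | github.com/danielvaanunu/MathGame | app.py | get_prev_level
-- ===== SOURCE A (Python) =====
-- def get_prev_level(curr_level):
--     levels = ["easy", "easy-medium", "medium", "medium-hard", "hard", "advanced"]
--     flag = False
--     prev_level = None
--
--     if curr_level == "easy":
--         return "easy"
--
--     for level in reversed(levels):
--         if flag:
--             prev_level = level
--             flag = False
--         if curr_level == level:
--             flag = True
--     return prev_level
-- ===== SOURCE B (Python) =====
-- def get_prev_level(curr_level):
--     levels = ["easy", "easy-medium", "medium", "medium-hard", "hard", "advanced"]
--     if curr_level not in levels: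
--         return None
--     i = levels.index(curr_level)
--     return levels[max(i - 1, 0)]
-- ===== Notes on version B (the rewrite author's own statement) =====
-- stated objective: simpler
-- what changed: Replaces the reversed scan with flag/prev_level state by a single position lookup (index, then the element one place earlier, clamped at the front).
import Mathlib
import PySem

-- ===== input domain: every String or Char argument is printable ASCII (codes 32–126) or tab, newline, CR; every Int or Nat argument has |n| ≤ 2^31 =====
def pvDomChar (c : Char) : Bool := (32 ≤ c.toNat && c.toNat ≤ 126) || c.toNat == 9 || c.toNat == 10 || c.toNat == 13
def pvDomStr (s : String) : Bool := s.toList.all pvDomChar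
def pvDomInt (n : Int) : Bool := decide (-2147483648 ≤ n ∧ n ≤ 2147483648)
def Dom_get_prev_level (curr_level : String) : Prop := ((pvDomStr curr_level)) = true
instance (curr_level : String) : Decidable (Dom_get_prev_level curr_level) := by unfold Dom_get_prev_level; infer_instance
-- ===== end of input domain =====

-- B replaces A's reversed scan with flag/prev_level state by a single index lookup (simpler decomposition).

-- ===== PORT A =====
def get_prev_level (curr_level : String) : Option String :=
  let levels : List String := ["easy", "easy-medium", "medium", "medium-hard", "hard", "advanced"]
  if curr_level = "easy" then some "easy"
  else
    (levels.reverse.foldl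
      (fun (st : Bool × Option String) level =>
        let st := if st.1 then (false, some level) else st
        if curr_level = level then (true, st.2) else st)
      (false, none)).2

-- ===== PORT B =====
def get_prev_level_alt (curr_level : String) : Option String :=
  let levels : List String := ["easy", "easy-medium", "medium", "medium-hard", "hard", "advanced"]
  if curr_level ∈ levels then
    match PySem.List.index? levels curr_level with
    | some i => PySem.List.pyGet? levels (max ((i : Int) - 1) 0)
    | none => none
  else none

-- ===== PRECONDITION & SPEC =====
def Spec_get_prev_level (curr_level : String) (out : Option String) : Prop := out = get_prev_level_alt curr_level
instance (curr_level : String) (out : Option String) : Decidable (Spec_get_prev_level curr_level out) := by unfold Spec_get_prev_level; infer_instance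

-- ===== CLAIM (what is proved, stated in full; the proofs are below) =====
def Claim_equal_get_prev_level : Prop := ∀ (curr_level : String), Dom_get_prev_level curr_level → Spec_get_prev_level curr_level (get_prev_level curr_level)

-- ===== LEMMAS AND PROOFS =====

-- ===== VERDICT (by name: the statement is the Claim_ definition above) =====
theorem get_prev_level_spec : Claim_equal_get_prev_level := by
  intro s _
  unfold Spec_get_prev_level get_prev_level get_prev_level_alt
  by_cases h1 : s = "easy"
  · subst h1; decide
  · by_cases h2 : s = "easy-medium"
    · subst h2; decide
    · by_cases h3 : s = "medium"
      · subst h3; decide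
      · by_cases h4 : s = "medium-hard"
        · subst h4; decide
        · by_cases h5 : s = "hard"
          · subst h5; decide
          · by_cases h6 : s = "advanced"
            · subst h6; decide
            · simp [h1, h2, h3, h4, h5, h6]
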